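/- GENERATED by mk_final_copies.py from the proof of the farm's unit `start_decoder.2d` (farm:start_decoder.2d.1: Lemmas.lean) as the
   re-elaboration sweep compiled it — do not edit. -/
import Asan.CheckWalk
import Vorbis.Spec.StartDecoderATest
import Vorbis.Spec.StartDecoderBTest
import Vorbis.Spec.Reader
import Vorbis.Spec.Units.start_decoder_2d

/-!
  Lemmas of unit `start_decoder.2d`: the seven error stubs of segment `.2` of start_decoder, WALKED, each from a point `P2.Pt` at the
  stub's first instruction to `AtERR` (the epilogue 0x113b22 with eax = 0 and SD.ERR from `P2.Inv.failed`). The seven proofs are one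
  template with the addresses substituted. The pure lemmas they use (`P2.Pt.step`, `P2.own_stores`, `P2.ownWins_ok`, `P2.allWins_ok`,
  `P2.Pt.atERR`) are in Vorbis/Spec/StartDecoder2.lean.
-/

namespace Vorbis.Spec.start_decoder_2d
open X86 X86.User Asan Vorbis Vorbis.Spec Vorbis.Spec.StartDecoder Vorbis.Spec.StartDecoder.P2

set_option maxRecDepth 4000 in
set_option maxHeartbeats 4000000 in
/-- The error stub 0x113b7a (`return error(f, VORBIS_invalid_first_page)` of line 3618): `mov esi, 22H ; mov rdi, rbp ; call error ;
jmp 113b22`, from a point of the segment to the epilogue with eax = 0. -/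
theorem stub_b7a {Lay : Layout} (hLay : Lay.hi = 0x1000000) {μ : Microarch} (hμ : UserX.MicroOK μ) {u₀ : State}
    (hcode : HasCodeNat Lay u₀ Vorbis.L.start_decoder.entry Vorbis.Code.code_start_decoder.nat Vorbis.L.start_decoder.size)
    (herr : ∀ (others : List Obj) (frames : List (Nat × FrameLayout)),
      Calls Lay μ Vorbis.WayInv (Vorbis.conv u₀) Vorbis.L.error.entry (Vorbis.Spec.error.spec others frames))
    {g : Ghost} {A : Arena × List Obj} {v : State} (hpt : Pt u₀ g A Vorbis.L.start_decoder.at_113b7a v) :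
    ReachVia Lay μ Vorbis.WayInv v (fun w => AtERR u₀ g w) := by
  have geo := hpt.geo
  obtain ⟨gr, gr8, glo, ghi, gobj, gobjLo, gobjHi, glog⟩ := geo
  have hfr := hpt.frame
  have w_rip := hfr.rip
  have hRn : (v.reg .rsp).toNat = g.R := by
    rw [hfr.rsp]
    exact toNat_addr _ (by omega)
  have haf : (addr g.f).toNat = g.f := toNat_addr _ (by omega)
  have hrbp := hpt.rbp
  have w_eq : Mem.EqOn Vorbis.L.textLo Vorbis.L.textHi u₀.mem v.mem := hfr.code
  have hdf : v.flags .df = false := (show abiInv _ from hfr.inv).1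
  have hmx : v.mxcsr &&& 0x1F80 = 0x1F80 := (show abiInv _ from hfr.inv).2
  have hsse := Vorbis.sseOK_of_abiInv hfr.inv
  have herr' := herr A.2 g.frames'
  u_walk hcode [hμ.vendor] until [Vorbis.L.start_decoder.cut4] span [Vorbis.L.textLo, Vorbis.L.textHi] side (v_side)
  · -- call_inv
    v_inv
  · -- error's precondition: the shadow clause below the call, `*f` inside one live object
    have hun : ShadowUntouched v.mem s_113b82.mem := by v_untouched
    refine ⟨shadowPre_call hfr ?_ hun, ?_⟩
    · rw [w_rsp]
      u_omega
    · rw [w_rdi, haf]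
      exact hpt.hand.obj.mono (callers_live g A.2)
  · -- after the call: the footprint over the memory of the point
    v_after_call w_rsp_113b82 w_mem_113b82
    simp only [w_rdi_113b82, haf] at w_same
    obtain ⟨hrax, hunc, _⟩ := w_post
    have hbits : Bits (g.Blk A) g.len s_113b82r.mem g.f := by
      have hso : Mem.SameExcept [⟨(v.reg .rsp).toNat - 408, (v.reg .rsp).toNat⟩, ⟨(v.reg .rsp).toNat + 16, (v.reg .rsp).toNat + 17⟩,
          ⟨(v.reg .rsp).toNat + 32, (v.reg .rsp).toNat + 36⟩, ⟨g.f + 1749, g.f + 1750⟩, ⟨g.f + 136, g.f + 144⟩]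
          v.mem s_113b82r.mem := by
        u_same
      rw [hRn] at hso
      exact (own_stores hpt.geo hpt.inv.bits hso (ownWins_ok g hpt.geo)).1
    have hs : Mem.SameExcept [⟨(v.reg .rsp).toNat - 408, (v.reg .rsp).toNat⟩, ⟨(v.reg .rsp).toNat + 16, (v.reg .rsp).toNat + 17⟩,
        ⟨(v.reg .rsp).toNat + 32, (v.reg .rsp).toNat + 36⟩, ⟨(v.reg .rsp).toNat + 160, (v.reg .rsp).toNat + 166⟩,
        ⟨g.f + 48, g.f + 56⟩, ⟨g.f + 84, g.f + 96⟩, ⟨g.f + 136, g.f + 144⟩, ⟨g.f + 1484, g.f + 1748⟩,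
        ⟨g.f + 1752, g.f + 1756⟩, ⟨g.f + 1776, g.f + 1784⟩] v.mem s_113b82r.mem := by
      u_same
    rw [hRn] at hs
    have hun : ShadowUntouched v.mem s_113b82r.mem := by v_untouched
    clear w_same
    u_walk hcode [hμ.vendor] until [Vorbis.L.start_decoder.cut4] span [Vorbis.L.textLo, Vorbis.L.textHi] side (v_side)
    -- 0x113b22, the epilogue, with eax = 0
    refine ReachVia.done ?_
    have hpt' : Pt u₀ g A pc_ERR s_113b87 := by
      refine hpt.step w_rip w_rsp (w_kept.get .rbp rfl) w_eq ?_ (ws := _) ?_ (allWins_ok g hpt.geo) ?_ ?_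
      · v_inv
      · rw [w_mem]
        exact hs
      · rw [w_mem]
        exact hun
      · rw [w_mem]
        exact hbits
    apply hpt'.atERR
    rw [w_rax]
    rfl

set_option maxRecDepth 4000 in
set_option maxHeartbeats 4000000 in
/-- The error stub 0x113b89 (`return error(f, VORBIS_invalid_first_page)` of line 3619): `mov esi, 22H ; mov rdi, rbp ; call error ;
jmp 113b22`, from a point of the segment to the epilogue with eax = 0. -/
theorem stub_b89 {Lay : Layout} (hLay : Lay.hi = 0x1000000) {μ : Microarch} (hμ : UserX.MicroOK μ) {u₀ : State}
    (hcode : HasCodeNat Lay u₀ Vorbis.L.start_decoder.entry Vorbis.Code.code_start_decoder.nat Vorbis.L.start_decoder.size)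
    (herr : ∀ (others : List Obj) (frames : List (Nat × FrameLayout)),
      Calls Lay μ Vorbis.WayInv (Vorbis.conv u₀) Vorbis.L.error.entry (Vorbis.Spec.error.spec others frames))
    {g : Ghost} {A : Arena × List Obj} {v : State} (hpt : Pt u₀ g A Vorbis.L.start_decoder.at_113b89 v) :
    ReachVia Lay μ Vorbis.WayInv v (fun w => AtERR u₀ g w) := by
  have geo := hpt.geo
  obtain ⟨gr, gr8, glo, ghi, gobj, gobjLo, gobjHi, glog⟩ := geo
  have hfr := hpt.frame
  have w_rip := hfr.rip
  have hRn : (v.reg .rsp).toNat = g.R := by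
    rw [hfr.rsp]
    exact toNat_addr _ (by omega)
  have haf : (addr g.f).toNat = g.f := toNat_addr _ (by omega)
  have hrbp := hpt.rbp
  have w_eq : Mem.EqOn Vorbis.L.textLo Vorbis.L.textHi u₀.mem v.mem := hfr.code
  have hdf : v.flags .df = false := (show abiInv _ from hfr.inv).1
  have hmx : v.mxcsr &&& 0x1F80 = 0x1F80 := (show abiInv _ from hfr.inv).2
  have hsse := Vorbis.sseOK_of_abiInv hfr.inv
  have herr' := herr A.2 g.frames'
  u_walk hcode [hμ.vendor] until [Vorbis.L.start_decoder.cut4] span [Vorbis.L.textLo, Vorbis.L.textHi] side (v_side)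
  · -- call_inv
    v_inv
  · -- error's precondition: the shadow clause below the call, `*f` inside one live object
    have hun : ShadowUntouched v.mem s_113b91.mem := by v_untouched
    refine ⟨shadowPre_call hfr ?_ hun, ?_⟩
    · rw [w_rsp]
      u_omega
    · rw [w_rdi, haf]
      exact hpt.hand.obj.mono (callers_live g A.2)
  · -- after the call: the footprint over the memory of the point
    v_after_call w_rsp_113b91 w_mem_113b91
    simp only [w_rdi_113b91, haf] at w_same
    obtain ⟨hrax, hunc, _⟩ := w_post
    have hbits : Bits (g.Blk A) g.len s_113b91r.mem g.f := by
      have hso : Mem.SameExcept [⟨(v.reg .rsp).toNat - 408, (v.reg .rsp).toNat⟩, ⟨(v.reg .rsp).toNat + 16, (v.reg .rsp).toNat + 17⟩,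
          ⟨(v.reg .rsp).toNat + 32, (v.reg .rsp).toNat + 36⟩, ⟨g.f + 1749, g.f + 1750⟩, ⟨g.f + 136, g.f + 144⟩]
          v.mem s_113b91r.mem := by
        u_same
      rw [hRn] at hso
      exact (own_stores hpt.geo hpt.inv.bits hso (ownWins_ok g hpt.geo)).1
    have hs : Mem.SameExcept [⟨(v.reg .rsp).toNat - 408, (v.reg .rsp).toNat⟩, ⟨(v.reg .rsp).toNat + 16, (v.reg .rsp).toNat + 17⟩,
        ⟨(v.reg .rsp).toNat + 32, (v.reg .rsp).toNat + 36⟩, ⟨(v.reg .rsp).toNat + 160, (v.reg .rsp).toNat + 166⟩,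
        ⟨g.f + 48, g.f + 56⟩, ⟨g.f + 84, g.f + 96⟩, ⟨g.f + 136, g.f + 144⟩, ⟨g.f + 1484, g.f + 1748⟩,
        ⟨g.f + 1752, g.f + 1756⟩, ⟨g.f + 1776, g.f + 1784⟩] v.mem s_113b91r.mem := by
      u_same
    rw [hRn] at hs
    have hun : ShadowUntouched v.mem s_113b91r.mem := by v_untouched
    clear w_same
    u_walk hcode [hμ.vendor] until [Vorbis.L.start_decoder.cut4] span [Vorbis.L.textLo, Vorbis.L.textHi] side (v_side)
    -- 0x113b22, the epilogue, with eax = 0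
    refine ReachVia.done ?_
    have hpt' : Pt u₀ g A pc_ERR s_113b96 := by
      refine hpt.step w_rip w_rsp (w_kept.get .rbp rfl) w_eq ?_ (ws := _) ?_ (allWins_ok g hpt.geo) ?_ ?_
      · v_inv
      · rw [w_mem]
        exact hs
      · rw [w_mem]
        exact hun
      · rw [w_mem]
        exact hbits
    apply hpt'.atERR
    rw [w_rax]
    rfl

set_option maxRecDepth 4000 in
set_option maxHeartbeats 4000000 in
/-- The error stub 0x113b98 (`return error(f, VORBIS_invalid_first_page)` of line 3620): `mov esi, 22H ; mov rdi, rbp ; call error ;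
jmp 113b22`, from a point of the segment to the epilogue with eax = 0. -/
theorem stub_b98 {Lay : Layout} (hLay : Lay.hi = 0x1000000) {μ : Microarch} (hμ : UserX.MicroOK μ) {u₀ : State}
    (hcode : HasCodeNat Lay u₀ Vorbis.L.start_decoder.entry Vorbis.Code.code_start_decoder.nat Vorbis.L.start_decoder.size)
    (herr : ∀ (others : List Obj) (frames : List (Nat × FrameLayout)),
      Calls Lay μ Vorbis.WayInv (Vorbis.conv u₀) Vorbis.L.error.entry (Vorbis.Spec.error.spec others frames))
    {g : Ghost} {A : Arena × List Obj} {v : State} (hpt : Pt u₀ g A Vorbis.L.start_decoder.at_113b98 v) :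
    ReachVia Lay μ Vorbis.WayInv v (fun w => AtERR u₀ g w) := by
  have geo := hpt.geo
  obtain ⟨gr, gr8, glo, ghi, gobj, gobjLo, gobjHi, glog⟩ := geo
  have hfr := hpt.frame
  have w_rip := hfr.rip
  have hRn : (v.reg .rsp).toNat = g.R := by
    rw [hfr.rsp]
    exact toNat_addr _ (by omega)
  have haf : (addr g.f).toNat = g.f := toNat_addr _ (by omega)
  have hrbp := hpt.rbp
  have w_eq : Mem.EqOn Vorbis.L.textLo Vorbis.L.textHi u₀.mem v.mem := hfr.code
  have hdf : v.flags .df = false := (show abiInv _ from hfr.inv).1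
  have hmx : v.mxcsr &&& 0x1F80 = 0x1F80 := (show abiInv _ from hfr.inv).2
  have hsse := Vorbis.sseOK_of_abiInv hfr.inv
  have herr' := herr A.2 g.frames'
  u_walk hcode [hμ.vendor] until [Vorbis.L.start_decoder.cut4] span [Vorbis.L.textLo, Vorbis.L.textHi] side (v_side)
  · -- call_inv
    v_inv
  · -- error's precondition: the shadow clause below the call, `*f` inside one live object
    have hun : ShadowUntouched v.mem s_113ba0.mem := by v_untouched
    refine ⟨shadowPre_call hfr ?_ hun, ?_⟩
    · rw [w_rsp]
      u_omega
    · rw [w_rdi, haf]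
      exact hpt.hand.obj.mono (callers_live g A.2)
  · -- after the call: the footprint over the memory of the point
    v_after_call w_rsp_113ba0 w_mem_113ba0
    simp only [w_rdi_113ba0, haf] at w_same
    obtain ⟨hrax, hunc, _⟩ := w_post
    have hbits : Bits (g.Blk A) g.len s_113ba0r.mem g.f := by
      have hso : Mem.SameExcept [⟨(v.reg .rsp).toNat - 408, (v.reg .rsp).toNat⟩, ⟨(v.reg .rsp).toNat + 16, (v.reg .rsp).toNat + 17⟩,
          ⟨(v.reg .rsp).toNat + 32, (v.reg .rsp).toNat + 36⟩, ⟨g.f + 1749, g.f + 1750⟩, ⟨g.f + 136, g.f + 144⟩]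
          v.mem s_113ba0r.mem := by
        u_same
      rw [hRn] at hso
      exact (own_stores hpt.geo hpt.inv.bits hso (ownWins_ok g hpt.geo)).1
    have hs : Mem.SameExcept [⟨(v.reg .rsp).toNat - 408, (v.reg .rsp).toNat⟩, ⟨(v.reg .rsp).toNat + 16, (v.reg .rsp).toNat + 17⟩,
        ⟨(v.reg .rsp).toNat + 32, (v.reg .rsp).toNat + 36⟩, ⟨(v.reg .rsp).toNat + 160, (v.reg .rsp).toNat + 166⟩,
        ⟨g.f + 48, g.f + 56⟩, ⟨g.f + 84, g.f + 96⟩, ⟨g.f + 136, g.f + 144⟩, ⟨g.f + 1484, g.f + 1748⟩,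
        ⟨g.f + 1752, g.f + 1756⟩, ⟨g.f + 1776, g.f + 1784⟩] v.mem s_113ba0r.mem := by
      u_same
    rw [hRn] at hs
    have hun : ShadowUntouched v.mem s_113ba0r.mem := by v_untouched
    clear w_same
    u_walk hcode [hμ.vendor] until [Vorbis.L.start_decoder.cut4] span [Vorbis.L.textLo, Vorbis.L.textHi] side (v_side)
    -- 0x113b22, the epilogue, with eax = 0
    refine ReachVia.done ?_
    have hpt' : Pt u₀ g A pc_ERR s_113ba5 := by
      refine hpt.step w_rip w_rsp (w_kept.get .rbp rfl) w_eq ?_ (ws := _) ?_ (allWins_ok g hpt.geo) ?_ ?_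
      · v_inv
      · rw [w_mem]
        exact hs
      · rw [w_mem]
        exact hun
      · rw [w_mem]
        exact hbits
    apply hpt'.atERR
    rw [w_rax]
    rfl

set_option maxRecDepth 4000 in
set_option maxHeartbeats 4000000 in
/-- The error stub 0x113baa (`return error(f, VORBIS_invalid_first_page)` of line 3622): `mov esi, 22H ; mov rdi, rbp ; call error ;
jmp 113b22`, from a point of the segment to the epilogue with eax = 0. -/
theorem stub_baa {Lay : Layout} (hLay : Lay.hi = 0x1000000) {μ : Microarch} (hμ : UserX.MicroOK μ) {u₀ : State}
    (hcode : HasCodeNat Lay u₀ Vorbis.L.start_decoder.entry Vorbis.Code.code_start_decoder.nat Vorbis.L.start_decoder.size)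
    (herr : ∀ (others : List Obj) (frames : List (Nat × FrameLayout)),
      Calls Lay μ Vorbis.WayInv (Vorbis.conv u₀) Vorbis.L.error.entry (Vorbis.Spec.error.spec others frames))
    {g : Ghost} {A : Arena × List Obj} {v : State} (hpt : Pt u₀ g A Vorbis.L.start_decoder.at_113baa v) :
    ReachVia Lay μ Vorbis.WayInv v (fun w => AtERR u₀ g w) := by
  have geo := hpt.geo
  obtain ⟨gr, gr8, glo, ghi, gobj, gobjLo, gobjHi, glog⟩ := geo
  have hfr := hpt.frame
  have w_rip := hfr.rip
  have hRn : (v.reg .rsp).toNat = g.R := by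
    rw [hfr.rsp]
    exact toNat_addr _ (by omega)
  have haf : (addr g.f).toNat = g.f := toNat_addr _ (by omega)
  have hrbp := hpt.rbp
  have w_eq : Mem.EqOn Vorbis.L.textLo Vorbis.L.textHi u₀.mem v.mem := hfr.code
  have hdf : v.flags .df = false := (show abiInv _ from hfr.inv).1
  have hmx : v.mxcsr &&& 0x1F80 = 0x1F80 := (show abiInv _ from hfr.inv).2
  have hsse := Vorbis.sseOK_of_abiInv hfr.inv
  have herr' := herr A.2 g.frames'
  u_walk hcode [hμ.vendor] until [Vorbis.L.start_decoder.cut4] span [Vorbis.L.textLo, Vorbis.L.textHi] side (v_side)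
  · -- call_inv
    v_inv
  · -- error's precondition: the shadow clause below the call, `*f` inside one live object
    have hun : ShadowUntouched v.mem s_113bb2.mem := by v_untouched
    refine ⟨shadowPre_call hfr ?_ hun, ?_⟩
    · rw [w_rsp]
      u_omega
    · rw [w_rdi, haf]
      exact hpt.hand.obj.mono (callers_live g A.2)
  · -- after the call: the footprint over the memory of the point
    v_after_call w_rsp_113bb2 w_mem_113bb2
    simp only [w_rdi_113bb2, haf] at w_same
    obtain ⟨hrax, hunc, _⟩ := w_post
    have hbits : Bits (g.Blk A) g.len s_113bb2r.mem g.f := by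
      have hso : Mem.SameExcept [⟨(v.reg .rsp).toNat - 408, (v.reg .rsp).toNat⟩, ⟨(v.reg .rsp).toNat + 16, (v.reg .rsp).toNat + 17⟩,
          ⟨(v.reg .rsp).toNat + 32, (v.reg .rsp).toNat + 36⟩, ⟨g.f + 1749, g.f + 1750⟩, ⟨g.f + 136, g.f + 144⟩]
          v.mem s_113bb2r.mem := by
        u_same
      rw [hRn] at hso
      exact (own_stores hpt.geo hpt.inv.bits hso (ownWins_ok g hpt.geo)).1
    have hs : Mem.SameExcept [⟨(v.reg .rsp).toNat - 408, (v.reg .rsp).toNat⟩, ⟨(v.reg .rsp).toNat + 16, (v.reg .rsp).toNat + 17⟩,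
        ⟨(v.reg .rsp).toNat + 32, (v.reg .rsp).toNat + 36⟩, ⟨(v.reg .rsp).toNat + 160, (v.reg .rsp).toNat + 166⟩,
        ⟨g.f + 48, g.f + 56⟩, ⟨g.f + 84, g.f + 96⟩, ⟨g.f + 136, g.f + 144⟩, ⟨g.f + 1484, g.f + 1748⟩,
        ⟨g.f + 1752, g.f + 1756⟩, ⟨g.f + 1776, g.f + 1784⟩] v.mem s_113bb2r.mem := by
      u_same
    rw [hRn] at hs
    have hun : ShadowUntouched v.mem s_113bb2r.mem := by v_untouched
    clear w_same
    u_walk hcode [hμ.vendor] until [Vorbis.L.start_decoder.cut4] span [Vorbis.L.textLo, Vorbis.L.textHi] side (v_side)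
    -- 0x113b22, the epilogue, with eax = 0
    refine ReachVia.done ?_
    have hpt' : Pt u₀ g A pc_ERR s_113bb7 := by
      refine hpt.step w_rip w_rsp (w_kept.get .rbp rfl) w_eq ?_ (ws := _) ?_ (allWins_ok g hpt.geo) ?_ ?_
      · v_inv
      · rw [w_mem]
        exact hs
      · rw [w_mem]
        exact hun
      · rw [w_mem]
        exact hbits
    apply hpt'.atERR
    rw [w_rax]
    rfl

set_option maxRecDepth 4000 in
set_option maxHeartbeats 4000000 in
/-- The error stub 0x113bdc (`return error(f, VORBIS_invalid_first_page)` of line 3634 (VORBIS_ogg_skeleton_not_supported)): `mov esi, 22H ; mov rdi, rbp ; call error ;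
jmp 113b22`, from a point of the segment to the epilogue with eax = 0. -/
theorem stub_bdc {Lay : Layout} (hLay : Lay.hi = 0x1000000) {μ : Microarch} (hμ : UserX.MicroOK μ) {u₀ : State}
    (hcode : HasCodeNat Lay u₀ Vorbis.L.start_decoder.entry Vorbis.Code.code_start_decoder.nat Vorbis.L.start_decoder.size)
    (herr : ∀ (others : List Obj) (frames : List (Nat × FrameLayout)),
      Calls Lay μ Vorbis.WayInv (Vorbis.conv u₀) Vorbis.L.error.entry (Vorbis.Spec.error.spec others frames))
    {g : Ghost} {A : Arena × List Obj} {v : State} (hpt : Pt u₀ g A Vorbis.L.start_decoder.at_113bdc v) :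
    ReachVia Lay μ Vorbis.WayInv v (fun w => AtERR u₀ g w) := by
  have geo := hpt.geo
  obtain ⟨gr, gr8, glo, ghi, gobj, gobjLo, gobjHi, glog⟩ := geo
  have hfr := hpt.frame
  have w_rip := hfr.rip
  have hRn : (v.reg .rsp).toNat = g.R := by
    rw [hfr.rsp]
    exact toNat_addr _ (by omega)
  have haf : (addr g.f).toNat = g.f := toNat_addr _ (by omega)
  have hrbp := hpt.rbp
  have w_eq : Mem.EqOn Vorbis.L.textLo Vorbis.L.textHi u₀.mem v.mem := hfr.code
  have hdf : v.flags .df = false := (show abiInv _ from hfr.inv).1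
  have hmx : v.mxcsr &&& 0x1F80 = 0x1F80 := (show abiInv _ from hfr.inv).2
  have hsse := Vorbis.sseOK_of_abiInv hfr.inv
  have herr' := herr A.2 g.frames'
  u_walk hcode [hμ.vendor] until [Vorbis.L.start_decoder.cut4] span [Vorbis.L.textLo, Vorbis.L.textHi] side (v_side)
  · -- call_inv
    v_inv
  · -- error's precondition: the shadow clause below the call, `*f` inside one live object
    have hun : ShadowUntouched v.mem s_113be4.mem := by v_untouched
    refine ⟨shadowPre_call hfr ?_ hun, ?_⟩
    · rw [w_rsp]
      u_omega
    · rw [w_rdi, haf]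
      exact hpt.hand.obj.mono (callers_live g A.2)
  · -- after the call: the footprint over the memory of the point
    v_after_call w_rsp_113be4 w_mem_113be4
    simp only [w_rdi_113be4, haf] at w_same
    obtain ⟨hrax, hunc, _⟩ := w_post
    have hbits : Bits (g.Blk A) g.len s_113be4r.mem g.f := by
      have hso : Mem.SameExcept [⟨(v.reg .rsp).toNat - 408, (v.reg .rsp).toNat⟩, ⟨(v.reg .rsp).toNat + 16, (v.reg .rsp).toNat + 17⟩,
          ⟨(v.reg .rsp).toNat + 32, (v.reg .rsp).toNat + 36⟩, ⟨g.f + 1749, g.f + 1750⟩, ⟨g.f + 136, g.f + 144⟩]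
          v.mem s_113be4r.mem := by
        u_same
      rw [hRn] at hso
      exact (own_stores hpt.geo hpt.inv.bits hso (ownWins_ok g hpt.geo)).1
    have hs : Mem.SameExcept [⟨(v.reg .rsp).toNat - 408, (v.reg .rsp).toNat⟩, ⟨(v.reg .rsp).toNat + 16, (v.reg .rsp).toNat + 17⟩,
        ⟨(v.reg .rsp).toNat + 32, (v.reg .rsp).toNat + 36⟩, ⟨(v.reg .rsp).toNat + 160, (v.reg .rsp).toNat + 166⟩,
        ⟨g.f + 48, g.f + 56⟩, ⟨g.f + 84, g.f + 96⟩, ⟨g.f + 136, g.f + 144⟩, ⟨g.f + 1484, g.f + 1748⟩,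
        ⟨g.f + 1752, g.f + 1756⟩, ⟨g.f + 1776, g.f + 1784⟩] v.mem s_113be4r.mem := by
      u_same
    rw [hRn] at hs
    have hun : ShadowUntouched v.mem s_113be4r.mem := by v_untouched
    clear w_same
    u_walk hcode [hμ.vendor] until [Vorbis.L.start_decoder.cut4] span [Vorbis.L.textLo, Vorbis.L.textHi] side (v_side)
    -- 0x113b22, the epilogue, with eax = 0
    refine ReachVia.done ?_
    have hpt' : Pt u₀ g A pc_ERR s_113be9 := by
      refine hpt.step w_rip w_rsp (w_kept.get .rbp rfl) w_eq ?_ (ws := _) ?_ (allWins_ok g hpt.geo) ?_ ?_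
      · v_inv
      · rw [w_mem]
        exact hs
      · rw [w_mem]
        exact hun
      · rw [w_mem]
        exact hbits
    apply hpt'.atERR
    rw [w_rax]
    rfl

set_option maxRecDepth 4000 in
set_option maxHeartbeats 4000000 in
/-- The error stub 0x113bfa (`return error(f, VORBIS_invalid_first_page)` of line 3641): `mov esi, 22H ; mov rdi, rbp ; call error ;
jmp 113b22`, from a point of the segment to the epilogue with eax = 0. -/
theorem stub_bfa {Lay : Layout} (hLay : Lay.hi = 0x1000000) {μ : Microarch} (hμ : UserX.MicroOK μ) {u₀ : State}
    (hcode : HasCodeNat Lay u₀ Vorbis.L.start_decoder.entry Vorbis.Code.code_start_decoder.nat Vorbis.L.start_decoder.size)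
    (herr : ∀ (others : List Obj) (frames : List (Nat × FrameLayout)),
      Calls Lay μ Vorbis.WayInv (Vorbis.conv u₀) Vorbis.L.error.entry (Vorbis.Spec.error.spec others frames))
    {g : Ghost} {A : Arena × List Obj} {v : State} (hpt : Pt u₀ g A Vorbis.L.start_decoder.at_113bfa v) :
    ReachVia Lay μ Vorbis.WayInv v (fun w => AtERR u₀ g w) := by
  have geo := hpt.geo
  obtain ⟨gr, gr8, glo, ghi, gobj, gobjLo, gobjHi, glog⟩ := geo
  have hfr := hpt.frame
  have w_rip := hfr.rip
  have hRn : (v.reg .rsp).toNat = g.R := by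
    rw [hfr.rsp]
    exact toNat_addr _ (by omega)
  have haf : (addr g.f).toNat = g.f := toNat_addr _ (by omega)
  have hrbp := hpt.rbp
  have w_eq : Mem.EqOn Vorbis.L.textLo Vorbis.L.textHi u₀.mem v.mem := hfr.code
  have hdf : v.flags .df = false := (show abiInv _ from hfr.inv).1
  have hmx : v.mxcsr &&& 0x1F80 = 0x1F80 := (show abiInv _ from hfr.inv).2
  have hsse := Vorbis.sseOK_of_abiInv hfr.inv
  have herr' := herr A.2 g.frames'
  u_walk hcode [hμ.vendor] until [Vorbis.L.start_decoder.cut4] span [Vorbis.L.textLo, Vorbis.L.textHi] side (v_side)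
  · -- call_inv
    v_inv
  · -- error's precondition: the shadow clause below the call, `*f` inside one live object
    have hun : ShadowUntouched v.mem s_113c02.mem := by v_untouched
    refine ⟨shadowPre_call hfr ?_ hun, ?_⟩
    · rw [w_rsp]
      u_omega
    · rw [w_rdi, haf]
      exact hpt.hand.obj.mono (callers_live g A.2)
  · -- after the call: the footprint over the memory of the point
    v_after_call w_rsp_113c02 w_mem_113c02
    simp only [w_rdi_113c02, haf] at w_same
    obtain ⟨hrax, hunc, _⟩ := w_post
    have hbits : Bits (g.Blk A) g.len s_113c02r.mem g.f := by
      have hso : Mem.SameExcept [⟨(v.reg .rsp).toNat - 408, (v.reg .rsp).toNat⟩, ⟨(v.reg .rsp).toNat + 16, (v.reg .rsp).toNat + 17⟩,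
          ⟨(v.reg .rsp).toNat + 32, (v.reg .rsp).toNat + 36⟩, ⟨g.f + 1749, g.f + 1750⟩, ⟨g.f + 136, g.f + 144⟩]
          v.mem s_113c02r.mem := by
        u_same
      rw [hRn] at hso
      exact (own_stores hpt.geo hpt.inv.bits hso (ownWins_ok g hpt.geo)).1
    have hs : Mem.SameExcept [⟨(v.reg .rsp).toNat - 408, (v.reg .rsp).toNat⟩, ⟨(v.reg .rsp).toNat + 16, (v.reg .rsp).toNat + 17⟩,
        ⟨(v.reg .rsp).toNat + 32, (v.reg .rsp).toNat + 36⟩, ⟨(v.reg .rsp).toNat + 160, (v.reg .rsp).toNat + 166⟩,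
        ⟨g.f + 48, g.f + 56⟩, ⟨g.f + 84, g.f + 96⟩, ⟨g.f + 136, g.f + 144⟩, ⟨g.f + 1484, g.f + 1748⟩,
        ⟨g.f + 1752, g.f + 1756⟩, ⟨g.f + 1776, g.f + 1784⟩] v.mem s_113c02r.mem := by
      u_same
    rw [hRn] at hs
    have hun : ShadowUntouched v.mem s_113c02r.mem := by v_untouched
    clear w_same
    u_walk hcode [hμ.vendor] until [Vorbis.L.start_decoder.cut4] span [Vorbis.L.textLo, Vorbis.L.textHi] side (v_side)
    -- 0x113b22, the epilogue, with eax = 0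
    refine ReachVia.done ?_
    have hpt' : Pt u₀ g A pc_ERR s_113c07 := by
      refine hpt.step w_rip w_rsp (w_kept.get .rbp rfl) w_eq ?_ (ws := _) ?_ (allWins_ok g hpt.geo) ?_ ?_
      · v_inv
      · rw [w_mem]
        exact hs
      · rw [w_mem]
        exact hun
      · rw [w_mem]
        exact hbits
    apply hpt'.atERR
    rw [w_rax]
    rfl

set_option maxRecDepth 4000 in
set_option maxHeartbeats 4000000 in
/-- The error stub 0x113b15 (`return error(f, VORBIS_invalid_first_page)` of line 3636, the common stub of the fishead diagnosis): `mov esi, 22H ; mov rdi, rbp ; call error`, which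
returns to 0x113b22, from a point of the segment to the epilogue with eax = 0. -/
theorem stub_b15 {Lay : Layout} (hLay : Lay.hi = 0x1000000) {μ : Microarch} (hμ : UserX.MicroOK μ) {u₀ : State}
    (hcode : HasCodeNat Lay u₀ Vorbis.L.start_decoder.entry Vorbis.Code.code_start_decoder.nat Vorbis.L.start_decoder.size)
    (herr : ∀ (others : List Obj) (frames : List (Nat × FrameLayout)),
      Calls Lay μ Vorbis.WayInv (Vorbis.conv u₀) Vorbis.L.error.entry (Vorbis.Spec.error.spec others frames))
    {g : Ghost} {A : Arena × List Obj} {v : State} (hpt : Pt u₀ g A Vorbis.L.start_decoder.at_113b15 v) :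
    ReachVia Lay μ Vorbis.WayInv v (fun w => AtERR u₀ g w) := by
  have geo := hpt.geo
  obtain ⟨gr, gr8, glo, ghi, gobj, gobjLo, gobjHi, glog⟩ := geo
  have hfr := hpt.frame
  have w_rip := hfr.rip
  have hRn : (v.reg .rsp).toNat = g.R := by
    rw [hfr.rsp]
    exact toNat_addr _ (by omega)
  have haf : (addr g.f).toNat = g.f := toNat_addr _ (by omega)
  have hrbp := hpt.rbp
  have w_eq : Mem.EqOn Vorbis.L.textLo Vorbis.L.textHi u₀.mem v.mem := hfr.code
  have hdf : v.flags .df = false := (show abiInv _ from hfr.inv).1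
  have hmx : v.mxcsr &&& 0x1F80 = 0x1F80 := (show abiInv _ from hfr.inv).2
  have hsse := Vorbis.sseOK_of_abiInv hfr.inv
  have herr' := herr A.2 g.frames'
  u_walk hcode [hμ.vendor] until [Vorbis.L.start_decoder.cut4] span [Vorbis.L.textLo, Vorbis.L.textHi] side (v_side)
  · -- call_inv
    v_inv
  · -- error's precondition: the shadow clause below the call, `*f` inside one live object
    have hun : ShadowUntouched v.mem s_113b1d.mem := by v_untouched
    refine ⟨shadowPre_call hfr ?_ hun, ?_⟩
    · rw [w_rsp]
      u_omega
    · rw [w_rdi, haf]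
      exact hpt.hand.obj.mono (callers_live g A.2)
  · -- after the call: the footprint over the memory of the point
    v_after_call w_rsp_113b1d w_mem_113b1d
    simp only [w_rdi_113b1d, haf] at w_same
    obtain ⟨hrax, hunc, _⟩ := w_post
    have hbits : Bits (g.Blk A) g.len s_113b1dr.mem g.f := by
      have hso : Mem.SameExcept [⟨(v.reg .rsp).toNat - 408, (v.reg .rsp).toNat⟩, ⟨(v.reg .rsp).toNat + 16, (v.reg .rsp).toNat + 17⟩,
          ⟨(v.reg .rsp).toNat + 32, (v.reg .rsp).toNat + 36⟩, ⟨g.f + 1749, g.f + 1750⟩, ⟨g.f + 136, g.f + 144⟩]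
          v.mem s_113b1dr.mem := by
        u_same
      rw [hRn] at hso
      exact (own_stores hpt.geo hpt.inv.bits hso (ownWins_ok g hpt.geo)).1
    have hs : Mem.SameExcept [⟨(v.reg .rsp).toNat - 408, (v.reg .rsp).toNat⟩, ⟨(v.reg .rsp).toNat + 16, (v.reg .rsp).toNat + 17⟩,
        ⟨(v.reg .rsp).toNat + 32, (v.reg .rsp).toNat + 36⟩, ⟨(v.reg .rsp).toNat + 160, (v.reg .rsp).toNat + 166⟩,
        ⟨g.f + 48, g.f + 56⟩, ⟨g.f + 84, g.f + 96⟩, ⟨g.f + 136, g.f + 144⟩, ⟨g.f + 1484, g.f + 1748⟩,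
        ⟨g.f + 1752, g.f + 1756⟩, ⟨g.f + 1776, g.f + 1784⟩] v.mem s_113b1dr.mem := by
      u_same
    rw [hRn] at hs
    have hun : ShadowUntouched v.mem s_113b1dr.mem := by v_untouched
    -- the call returns to 0x113b22, the epilogue, with eax = 0
    refine ReachVia.done ?_
    have hpt' : Pt u₀ g A pc_ERR s_113b1dr :=
      hpt.step w_rip w_rsp (w_kept.get .rbp rfl) w_eq w_inv hs (allWins_ok g hpt.geo) hun hbits
    apply hpt'.atERR
    rw [hrax]
    rfl

end Vorbis.Spec.start_decoder_2d
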